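-- pv_equiv track=rewrite | github.com/CodeByJohnDoe/Coding-Accelerator | Python/unbuilt_function.py | twins
-- ===== SOURCE A (Python) =====
-- def twins(to_be_test):
--     to_be_test_sorted = sorted(to_be_test)
--     answer = []
--     n = len(to_be_test_sorted)
--     i = 0
--
--     while i < n:
--         if i == n-1 or to_be_test_sorted[i] != to_be_test_sorted[i+1]:
--             answer.append(to_be_test_sorted[i])
--             i += 1
--         else:
--             i += 2  # twins
--
--     return answer
-- ===== SOURCE B (Python) =====
-- def twins(to_be_test):
--     counts = {}
--     for x in to_be_test:
--         counts[x] = counts.get(x, 0) + 1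
--     return sorted(k for k, c in counts.items() if c % 2 == 1)
-- ===== Notes on version B (the rewrite author's own statement) =====
-- stated objective: simpler
-- what changed: Replaces the sorted-adjacency pair-skipping index loop by a frequency dict built in one pass, returning the sorted keys with odd count.
import Mathlib
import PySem

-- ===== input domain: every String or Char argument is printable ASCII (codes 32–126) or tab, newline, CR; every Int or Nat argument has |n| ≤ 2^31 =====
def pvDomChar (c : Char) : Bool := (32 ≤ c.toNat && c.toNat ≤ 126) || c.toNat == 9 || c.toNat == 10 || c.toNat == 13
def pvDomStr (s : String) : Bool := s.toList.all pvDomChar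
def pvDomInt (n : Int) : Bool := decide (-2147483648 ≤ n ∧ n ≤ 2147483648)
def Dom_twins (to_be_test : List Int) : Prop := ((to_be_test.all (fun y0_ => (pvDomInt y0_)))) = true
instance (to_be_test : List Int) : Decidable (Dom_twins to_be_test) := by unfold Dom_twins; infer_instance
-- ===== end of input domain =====

-- B replaces A's pair-skipping walk over the sorted list by a frequency dict built in
-- one pass, returning the sorted keys with odd count (simpler).

-- ===== PORT A =====
-- the while loop over the sorted list: step i+1 when last or a[i] ≠ a[i+1] (emit), else i+2
def twinsGo : List Int → List Int
  | [] => []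
  | [x] => [x]
  | x :: y :: rest => if x ≠ y then x :: twinsGo (y :: rest) else twinsGo rest

def twins (to_be_test : List Int) : List Int :=
  twinsGo (PySem.List.sorted to_be_test (fun x => x) false)

-- ===== PORT B =====
-- counts = {}; for x: counts[x] = counts.get(x, 0) + 1; sorted(k for k, c in counts.items() if c % 2 == 1)
def twins_alt (to_be_test : List Int) : List Int :=
  PySem.List.sorted
    (((to_be_test.foldl (fun d x => d.insert x (d.getD x 0 + 1)) PySem.Dict.empty).items.filter
        (fun p => PySem.Int.mod p.2 2 == 1)).map (·.1))
    (fun k => k) false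

-- ===== PRECONDITION & SPEC =====
def Spec_twins (to_be_test : List Int) (out : List Int) : Prop := out = twins_alt to_be_test
instance (to_be_test : List Int) (out : List Int) : Decidable (Spec_twins to_be_test out) := by unfold Spec_twins; infer_instance

-- ===== CLAIM (what is proved, stated in full; the proofs are below) =====
def Claim_equal_twins : Prop := ∀ (to_be_test : List Int), Dom_twins to_be_test → Spec_twins to_be_test (twins to_be_test)

-- ===== LEMMAS AND PROOFS =====

-- On a (≤)-sorted list, twinsGo returns a strictly increasing list whose members
-- are exactly the values of odd multiplicity.
theorem twinsGo_spec (l : List Int) (h : l.Pairwise (· ≤ ·)) :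
    (twinsGo l).Pairwise (· < ·) ∧ ∀ z, z ∈ twinsGo l ↔ l.count z % 2 = 1 := by
  induction l using twinsGo.induct with
  | case1 => simp [twinsGo]
  | case2 x =>
      refine ⟨by simp [twinsGo], ?_⟩
      intro z
      by_cases hz : z = x
      · subst hz; simp [twinsGo]
      · simp [twinsGo, hz, Ne.symm hz]
  | case3 x y rest hne ih =>
      have hxy : x ≤ y := (List.pairwise_cons.mp h).1 y (by simp)
      have hlt : x < y := lt_of_le_of_ne hxy hne
      have hrest : (y :: rest).Pairwise (· ≤ ·) := (List.pairwise_cons.mp h).2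
      have hxall : ∀ z ∈ y :: rest, x < z := by
        intro z hzmem
        rcases List.mem_cons.mp hzmem with rfl | hz
        · exact hlt
        · exact lt_of_lt_of_le hlt (List.rel_of_pairwise_cons hrest hz)
      obtain ⟨ihp, ihm⟩ := ih hrest
      constructor
      · simp only [twinsGo, if_pos hne]
        refine List.pairwise_cons.mpr ⟨?_, ihp⟩
        intro z hz
        exact hxall z (by
          have := (ihm z).mp hz
          exact List.count_pos_iff.mp (by omega))
      · intro z
        simp only [twinsGo, if_pos hne, List.mem_cons, ihm]
        by_cases hzx : z = x
        · subst hzx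
          have h0 : (y :: rest).count z = 0 :=
            List.count_eq_zero.mpr (fun hmem => lt_irrefl z (hxall z hmem))
          simp [List.count_cons_self, h0]
        · simp [List.count_cons, hzx, Ne.symm hzx]
  | case4 x y rest hne ih =>
      have hx : x = y := by
        by_contra hc; exact hne (fun hxy => hc hxy)
      subst hx
      have hrest2 : rest.Pairwise (· ≤ ·) :=
        ((List.pairwise_cons.mp (List.pairwise_cons.mp h).2).2)
      obtain ⟨ihp, ihm⟩ := ih hrest2
      refine ⟨by simpa [twinsGo] using ihp, ?_⟩
      intro z
      have hgo : twinsGo (x :: x :: rest) = twinsGo rest := by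
        simp [twinsGo]
      rw [hgo, ihm z]
      by_cases hzx : z = x
      · subst hzx
        rw [List.count_cons_self, List.count_cons_self]
        omega
      · simp [Ne.symm hzx]

-- B's filtered key list: distinct keys of the input with odd multiplicity.
theorem alt_keylist (xs : List Int) :
    (((PySem.Dict.counter xs).items.filter (fun p => PySem.Int.mod p.2 2 == 1)).map (·.1))
      = (PySem.Set.ofList xs).filter (fun k => xs.count k % 2 == 1) := by
  rw [PySem.Dict.items_counter]
  rw [List.filter_map, List.map_map]
  have hm : ∀ k : Int, (PySem.Int.mod ((xs.count k : Nat) : Int) 2 == 1)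
      = (xs.count k % 2 == 1) := by
    intro k
    have h := PySem.Int.mod_natCast (xs.count k) 2
    rw [show ((2 : Nat) : Int) = 2 from rfl] at h
    rw [h]
    rcases Nat.mod_two_eq_zero_or_one (xs.count k) with h2 | h2 <;> simp [h2]
  simp only [Function.comp_def, hm]
  simp [List.map_id']

theorem twins_eq_alt (xs : List Int) : twins xs = twins_alt xs := by
  unfold twins twins_alt
  rw [show (xs.foldl (fun d x => d.insert x (d.getD x 0 + 1)) PySem.Dict.empty)
        = PySem.Dict.counter xs from PySem.Dict.foldl_insert_getD_add_one_eq_counter xs]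
  rw [alt_keylist]
  set s := PySem.List.sorted xs (fun x => x) false with hs
  have hperm : s.Perm xs := PySem.List.sorted_perm xs _ _
  have hpw : s.Pairwise (· ≤ ·) := by
    simpa using PySem.List.sorted_pairwise xs (fun x => x)
  obtain ⟨hlt, hmem⟩ := twinsGo_spec s hpw
  have hperm2 : (twinsGo s).Perm
      ((PySem.Set.ofList xs).filter (fun k => xs.count k % 2 == 1)) := by
    refine (List.perm_ext_iff_of_nodup hlt.nodup
      ((PySem.Set.nodup_ofList xs).filter _)).mpr ?_
    intro z
    rw [hmem z, List.mem_filter, PySem.Set.mem_ofList]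
    have hcnt : s.count z = xs.count z := hperm.count_eq z
    constructor
    · intro hodd
      refine ⟨List.count_pos_iff.mp (by omega), by simp [← hcnt]; omega⟩
    · rintro ⟨_, hodd⟩
      simp at hodd
      omega
  exact (PySem.List.sorted_eq_of_perm_of_pairwise_lt
    ((PySem.Set.ofList xs).filter (fun k => xs.count k % 2 == 1)) (twinsGo s) (fun k => k)
    hperm2 (by simpa using hlt)).symm

-- ===== VERDICT (by name: the statement is the Claim_ definition above) =====
theorem twins_spec : Claim_equal_twins := by
  intro xs _
  unfold Spec_twins
  exact twins_eq_alt xs
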